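-- pv_equiv track=rewrite | github.com/trevor-morgan/openevolve | examples/arc_topology/evaluator.py | directed_clique_count
-- ===== SOURCE A (Python) =====
-- def directed_clique_count(adjacency_matrix: list[list[int]], max_k: int = 3) -> list[int]:
--     """
--     Count directed k-simplices (directed cliques) in a directed graph.
--     """
--     n = len(adjacency_matrix)
--
--     # 0-simplices = nodes
--     counts = [n]
--
--     if max_k < 1:
--         return counts
--
--     # 1-simplices = directed edges
--     edges = sum(adjacency_matrix[i][j] for i in range(n) for j in range(n))
--     counts.append(edges)
--
--     if max_k < 2:
--         return counts
--
--     # 2-simplices = directed triangles (i -> j, i -> k, j -> k)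
--     triangles = 0
--     for i in range(n):
--         for j in range(n):
--             if adjacency_matrix[i][j]:
--                 for k in range(n):
--                     if adjacency_matrix[i][k] and adjacency_matrix[j][k]:
--                         triangles += 1
--     counts.append(triangles)
--
--     if max_k < 3:
--         return counts
--
--     # 3-simplices = directed tetrahedra
--     tetrahedra = 0
--     for i in range(n):
--         for j in range(n):
--             if not adjacency_matrix[i][j]:
--                 continue
--             for k in range(n):
--                 if not (adjacency_matrix[i][k] and adjacency_matrix[j][k]):
--                     continue
--                 for l in range(n):
--                     if adjacency_matrix[i][l] and adjacency_matrix[j][l] and adjacency_matrix[k][l]: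
--                         tetrahedra += 1
--     counts.append(tetrahedra)
--
--     return counts
-- ===== SOURCE B (Python) =====
-- def directed_clique_count(adjacency_matrix: list[list[int]], max_k: int = 3) -> list[int]:
--     """Bitset re-implementation: adjacency rows become integer bit masks, and the
--     innermost node scans of the triangle/tetrahedron counts are replaced by a
--     popcount of ANDed masks."""
--     n = len(adjacency_matrix)
--
--     counts = [n]
--     if max_k < 1:
--         return counts
--
--     # 1-simplices: sum of all entries of the n x n matrix
--     counts.append(sum(sum(row[:n]) for row in adjacency_matrix))
--     if max_k < 2:
--         return counts
--
--     # bit j of masks[i] is set iff there is an edge i -> j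
--     masks = [sum(1 << j for j, v in enumerate(row[:n]) if v) for row in adjacency_matrix]
--
--     triangles = 0
--     for i in range(n):
--         mi = masks[i]
--         for j in range(n):
--             if mi >> j & 1:
--                 triangles += (mi & masks[j]).bit_count()
--     counts.append(triangles)
--     if max_k < 3:
--         return counts
--
--     tetrahedra = 0
--     for i in range(n):
--         mi = masks[i]
--         for j in range(n):
--             if mi >> j & 1:
--                 m = mi & masks[j]
--                 for k in range(n):
--                     if m >> k & 1:
--                         tetrahedra += (m & masks[k]).bit_count()
--     counts.append(tetrahedra)
--     return counts
-- ===== Notes on version B (the rewrite author's own statement) =====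
-- stated objective: faster
-- what changed: Adjacency rows are packed once into integer bit masks; the innermost node scans of the triangle and tetrahedron counts become a single AND + popcount per (i,j) resp. (i,j,k) pair.
import Mathlib
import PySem

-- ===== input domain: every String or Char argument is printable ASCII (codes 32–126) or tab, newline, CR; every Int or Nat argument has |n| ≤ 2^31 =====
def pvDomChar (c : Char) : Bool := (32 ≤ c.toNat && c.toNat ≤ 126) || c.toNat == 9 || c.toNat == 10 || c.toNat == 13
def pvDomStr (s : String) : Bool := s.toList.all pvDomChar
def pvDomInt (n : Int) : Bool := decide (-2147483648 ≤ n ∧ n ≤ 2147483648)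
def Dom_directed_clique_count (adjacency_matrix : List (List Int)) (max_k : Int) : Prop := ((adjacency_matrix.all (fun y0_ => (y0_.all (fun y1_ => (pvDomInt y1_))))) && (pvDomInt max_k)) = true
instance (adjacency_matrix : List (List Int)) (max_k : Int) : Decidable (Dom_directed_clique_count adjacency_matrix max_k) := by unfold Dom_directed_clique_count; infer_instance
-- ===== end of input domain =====

-- B packs each adjacency row into a bit mask and replaces the innermost node scans of the
-- triangle/tetrahedron counts by popcounts of ANDed masks (measurably faster, same values).


-- ===== PORT A =====
-- adjacency_matrix[i][j]; exact under Pre_ (the IndexError of a too-short row is excluded there)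
def pvAt (a : List (List Int)) (i j : Int) : Int :=
  PySem.List.pyGetD (PySem.List.pyGetD a i []) j 0

def directed_clique_count (adjacency_matrix : List (List Int)) (max_k : Int) : List Int :=
  let n : Int := PySem.List.len adjacency_matrix
  let counts : List Int := [n]
  if max_k < 1 then counts else
  -- edges = sum(adjacency_matrix[i][j] for i in range(n) for j in range(n))
  let edges : Int :=
    ((PySem.List.pyRange 0 n 1).flatMap (fun i =>
      (PySem.List.pyRange 0 n 1).map (fun j => pvAt adjacency_matrix i j))).sum
  let counts := counts ++ [edges]
  if max_k < 2 then counts else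
  let triangles : Int :=
    (PySem.List.pyRange 0 n 1).foldl (fun acc i =>
      (PySem.List.pyRange 0 n 1).foldl (fun acc j =>
        if pvAt adjacency_matrix i j ≠ 0 then
          (PySem.List.pyRange 0 n 1).foldl (fun acc k =>
            if pvAt adjacency_matrix i k ≠ 0 ∧ pvAt adjacency_matrix j k ≠ 0 then
              acc + 1
            else acc) acc
        else acc) acc) 0
  let counts := counts ++ [triangles]
  if max_k < 3 then counts else
  let tetrahedra : Int :=
    (PySem.List.pyRange 0 n 1).foldl (fun acc i =>
      (PySem.List.pyRange 0 n 1).foldl (fun acc j =>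
        if ¬ (pvAt adjacency_matrix i j ≠ 0) then acc else   -- 'continue'
          (PySem.List.pyRange 0 n 1).foldl (fun acc k =>
            if ¬ (pvAt adjacency_matrix i k ≠ 0 ∧ pvAt adjacency_matrix j k ≠ 0) then acc else
              (PySem.List.pyRange 0 n 1).foldl (fun acc l =>
                if pvAt adjacency_matrix i l ≠ 0 ∧ pvAt adjacency_matrix j l ≠ 0 ∧
                   pvAt adjacency_matrix k l ≠ 0 then acc + 1 else acc) acc) acc) acc) 0
  counts ++ [tetrahedra]

-- ===== PORT B =====
-- sum(1 << j for j, v in enumerate(row[:n]) if v); the mask is a nonnegative Python int = Nat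
def pvMask (n : Nat) (row : List Int) : Nat :=
  (PySem.List.enumerate (PySem.List.slice row none (some (n : Int))) 0).foldl
    (fun (m : Nat) (p : Int × Int) => if p.2 ≠ 0 then m + (1 <<< p.1.toNat) else m) 0

def directed_clique_count_alt (adjacency_matrix : List (List Int)) (max_k : Int) : List Int :=
  let n : Nat := adjacency_matrix.length
  let counts : List Int := [(n : Int)]
  if max_k < 1 then counts else
  let counts := counts ++
    [(adjacency_matrix.map (fun row => (PySem.List.slice row none (some (n : Int))).sum)).sum]
  if max_k < 2 then counts else
  let masks : List Nat := adjacency_matrix.map (pvMask n)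
  let triangles : Int :=
    (List.range n).foldl (fun acc i =>
      let mi := masks.getD i 0            -- masks[i]; i < n = masks.length, so always in range
      (List.range n).foldl (fun acc j =>
        if (mi >>> j) &&& 1 ≠ 0 then      -- mi >> j & 1
          acc + (PySem.Int.bitCount ((mi &&& masks.getD j 0 : Nat) : Int) : Int)
        else acc) acc) 0
  let counts := counts ++ [triangles]
  if max_k < 3 then counts else
  let tetrahedra : Int :=
    (List.range n).foldl (fun acc i =>
      let mi := masks.getD i 0
      (List.range n).foldl (fun acc j =>
        if (mi >>> j) &&& 1 ≠ 0 then
          let m := mi &&& masks.getD j 0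
          (List.range n).foldl (fun acc k =>
            if (m >>> k) &&& 1 ≠ 0 then
              acc + (PySem.Int.bitCount ((m &&& masks.getD k 0 : Nat) : Int) : Int)
            else acc) acc
        else acc) acc) 0
  counts ++ [tetrahedra]

-- ===== PRECONDITION & SPEC =====
-- Pre_ excludes exactly the inputs where A raises IndexError: a row shorter than the matrix
-- while max_k ≥ 1 (for max_k < 1 A returns [n] without ever indexing a row).
def Pre_directed_clique_count (adjacency_matrix : List (List Int)) (max_k : Int) : Prop :=
  max_k < 1 ∨ ∀ row ∈ adjacency_matrix, adjacency_matrix.length ≤ row.length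
instance (adjacency_matrix : List (List Int)) (max_k : Int) : Decidable (Pre_directed_clique_count adjacency_matrix max_k) := by unfold Pre_directed_clique_count; infer_instance

def pvWitness_directed_clique_count : List (List Int) × Int := ([[0, 1], [1, 1]], 3)

def Spec_directed_clique_count (adjacency_matrix : List (List Int)) (max_k : Int) (out : List Int) : Prop := out = directed_clique_count_alt adjacency_matrix max_k
instance (adjacency_matrix : List (List Int)) (max_k : Int) (out : List Int) : Decidable (Spec_directed_clique_count adjacency_matrix max_k out) := by unfold Spec_directed_clique_count; infer_instance

-- ===== CLAIM (what is proved, stated in full; the proofs are below) =====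
def Claim_equal_directed_clique_count : Prop := ∀ (adjacency_matrix : List (List Int)) (max_k : Int), Dom_directed_clique_count adjacency_matrix max_k → Pre_directed_clique_count adjacency_matrix max_k → Spec_directed_clique_count adjacency_matrix max_k (directed_clique_count adjacency_matrix max_k)

-- ===== LEMMAS AND PROOFS =====

def pvM : List Int → Nat
  | [] => 0
  | x :: l => (if x ≠ 0 then 1 else 0) + 2 * pvM l

theorem pvM_maskAux (l : List Int) : ∀ (s acc : Nat),
    (PySem.List.enumerate l (s : Int)).foldl
      (fun (m : Nat) (p : Int × Int) => if p.2 ≠ 0 then m + (1 <<< p.1.toNat) else m) acc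
    = acc + 2 ^ s * pvM l := by
  induction l with
  | nil => intro s acc; simp [PySem.List.enumerate_nil, pvM]
  | cons x l ih =>
    intro s acc
    rw [PySem.List.enumerate_cons]
    have hs1 : (s : Int) + 1 = ((s + 1 : Nat) : Int) := by push_cast; ring
    simp only [List.foldl_cons, hs1, ih]
    by_cases hx : x ≠ 0 <;>
      simp [hx, pvM, Nat.one_shiftLeft, pow_succ] <;> ring

theorem pvM_lt (l : List Int) : pvM l < 2 ^ l.length := by
  induction l with
  | nil => simp [pvM]
  | cons x l ih => by_cases hx : x ≠ 0 <;> simp [pvM, hx, pow_succ] <;> omega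

theorem pvM_testBit (l : List Int) : ∀ k : Nat,
    (pvM l).testBit k = (decide (k < l.length) && decide (l.getD k 0 ≠ 0)) := by
  induction l with
  | nil => intro k; simp [pvM]
  | cons x l ih =>
    intro k
    have hdiv : ((if x ≠ 0 then 1 else 0) + 2 * pvM l) / 2 = pvM l := by
      by_cases hx : x ≠ 0 <;> simp [hx] <;> omega
    cases k with
    | zero => by_cases hx : x ≠ 0 <;> simp [pvM, Nat.testBit_zero, hx]
    | succ k => rw [pvM, Nat.testBit_add_one, hdiv, ih k]; simp

theorem pvPop_eq (n : Nat) : ∀ m : Nat, m < 2 ^ n →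
    PySem.Int.bitCount (m : Int) = (List.range n).countP (fun k => m.testBit k) := by
  induction n with
  | zero => intro m hm; interval_cases m; simp
  | succ n ih =>
    intro m hm
    rcases Nat.eq_zero_or_pos m with h0 | h0
    · subst h0; simp
    · rw [PySem.Int.bitCount_natCast h0, ih (m / 2) (by omega)]
      rw [List.range_succ_eq_map]
      simp only [List.countP_cons, List.countP_map]
      have hc : List.countP ((fun k => m.testBit k) ∘ Nat.succ) (List.range n)
          = List.countP (fun k => (m / 2).testBit k) (List.range n) := by
        apply List.countP_congr; intro k _
        simp [Function.comp, Nat.testBit_add_one]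
      rw [hc]
      have ht0 : (m.testBit 0) = decide (m % 2 = 1) := by simp [Nat.testBit_zero]
      rw [ht0]
      by_cases h1 : m % 2 = 1 <;> simp [h1] <;> omega

theorem pvAnd_lt {x n : Nat} (y : Nat) (h : x < 2 ^ n) : x &&& y < 2 ^ n := by
  apply Nat.lt_pow_two_of_testBit
  intro i hi
  rw [Nat.testBit_and]
  have hx : x.testBit i = false := by
    rcases Nat.lt_or_ge i n with h' | h'; · omega
    exact Nat.testBit_lt_two_pow (lt_of_lt_of_le h (Nat.pow_le_pow_right (by norm_num) h'))
  simp [hx]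

theorem pvShiftTest (m j : Nat) : ((m >>> j) &&& 1 ≠ 0) ↔ m.testBit j = true := by
  simp [Nat.testBit, Nat.and_comm]

theorem pvPyRange_cast (n : Nat) :
    PySem.List.pyRange 0 (n : Int) 1 = (List.range n).map (fun (k : Nat) => (k : Int)) := by
  rw [PySem.List.pyRange_one]; simp

theorem pvAt_cast (a : List (List Int)) (i j : Nat) :
    pvAt a (i : Int) (j : Int) = (a.getD i []).getD j 0 := by
  simp [pvAt]

theorem pvGetD_map {β : Type} [Inhabited β] (l : List (List Int)) (f : List Int → β) (d : β)
    (i : Nat) (h : i < l.length) : (l.map f).getD i d = f (l.getD i []) := by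
  simp [List.getD_eq_getElem?_getD, List.getElem?_eq_getElem, h]

theorem pvRows_map (l : List (List Int)) (f : List Int → Int) :
    (List.range l.length).map (fun i => f (l.getD i [])) = l.map f := by
  apply List.ext_getElem
  · simp
  · intro i h1 h2; simp at h1 ⊢
    rw [List.getElem?_eq_getElem (by simpa using h1)]
    simp

theorem pvRange_map_getD (row : List Int) : ∀ n : Nat, n ≤ row.length →
    (List.range n).map (fun j => row.getD j 0) = row.take n := by
  intro n
  induction n with
  | zero => simp
  | succ n ih =>
    intro h
    rw [List.range_succ, List.map_append, ih (by omega), List.take_succ]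
    simp [List.getD_eq_getElem?_getD, List.getElem?_eq_getElem (show n < row.length by omega)]

theorem pvMask_eq (n : Nat) (row : List Int) : pvMask n row = pvM (row.take n) := by
  unfold pvMask
  rw [PySem.List.slice_to_natCast]
  have := pvM_maskAux (row.take n) 0 0
  simpa using this

theorem pvMask_testBit (a : List (List Int)) (i j : Nat) (hi : i < a.length)
    (hrow : a.length ≤ (a.getD i []).length) :
    ((a.map (pvMask a.length)).getD i 0).testBit j
      = (decide (j < a.length) && decide ((a.getD i []).getD j 0 ≠ 0)) := by
  rw [pvGetD_map a _ 0 i hi, pvMask_eq, pvM_testBit]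
  have hlen : ((a.getD i []).take a.length).length = a.length := by
    rw [List.getD_eq_getElem?_getD] at hrow
    simp [List.length_take]
    omega
  by_cases hj : j < a.length
  · have hg : ((a.getD i []).take a.length).getD j 0 = (a.getD i []).getD j 0 := by
      simp [List.getD_eq_getElem?_getD, List.getElem?_take, hj]
    rw [hlen, hg]
  · rw [hlen]
    simp [hj]

theorem pvMask_lt (a : List (List Int)) (i : Nat) (hi : i < a.length) :
    (a.map (pvMask a.length)).getD i 0 < 2 ^ a.length := by
  rw [pvGetD_map a _ 0 i hi, pvMask_eq]
  exact lt_of_lt_of_le (pvM_lt _)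
    (Nat.pow_le_pow_right (by norm_num) (by simp [List.length_take]))

theorem pvPop_and (n mi mj : Nat) (h : mi < 2 ^ n) :
    (PySem.Int.bitCount ((mi &&& mj : Nat) : Int) : Int)
      = ((List.range n).countP (fun k => mi.testBit k && mj.testBit k) : Int) := by
  rw [pvPop_eq n _ (pvAnd_lt mj h)]
  congr 1
  apply List.countP_congr
  intro k _
  simp [Nat.testBit_and]

theorem pvRow_mem (a : List (List Int)) (i : Nat) (hi : i < a.length) : a.getD i [] ∈ a := by
  rw [List.getD_eq_getElem?_getD, List.getElem?_eq_getElem hi]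
  exact List.getElem_mem hi

theorem pvSum_flatMap (l : List Int) (f : Int → List Int) :
    (l.flatMap f).sum = (l.map (fun x => (f x).sum)).sum := by
  induction l with
  | nil => simp
  | cons x l ih => simp [ih]

theorem pvMap_range {β : Type} (n : Nat) (f : Int → β) :
    (PySem.List.pyRange 0 (n : Int) 1).map f = (List.range n).map (fun (k : Nat) => f (k : Int)) := by
  rw [pvPyRange_cast, List.map_map]
  rfl

theorem pvFoldl_range {β : Type} (n : Nat) (f : β → Int → β) (init : β) :
    (PySem.List.pyRange 0 (n : Int) 1).foldl f init
      = (List.range n).foldl (fun acc (k : Nat) => f acc (k : Int)) init := by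
  rw [pvPyRange_cast, List.foldl_map]

theorem pvEdges (a : List (List Int)) (hP : ∀ row ∈ a, a.length ≤ row.length) :
    ((PySem.List.pyRange 0 (a.length : Int) 1).flatMap (fun i =>
        (PySem.List.pyRange 0 (a.length : Int) 1).map (fun j => pvAt a i j))).sum
    = (a.map (fun row => (PySem.List.slice row none (some (a.length : Int))).sum)).sum := by
  rw [pvSum_flatMap, pvMap_range]
  have h1 : (List.range a.length).map
        (fun i : Nat => ((PySem.List.pyRange 0 (a.length : Int) 1).map (fun j => pvAt a (i : Int) j)).sum)
      = (List.range a.length).map (fun i : Nat => ((a.getD i []).take a.length).sum) := by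
    apply List.map_congr_left
    intro i hi
    rw [pvMap_range]
    have h2 : (List.range a.length).map (fun j : Nat => pvAt a (i : Int) (j : Int))
        = (List.range a.length).map (fun j : Nat => (a.getD i []).getD j 0) := by
      apply List.map_congr_left
      intro j _
      exact pvAt_cast a i j
    rw [h2, pvRange_map_getD _ _ (hP _ (pvRow_mem a i (List.mem_range.mp hi)))]
  rw [h1, pvRows_map a (fun row => (row.take a.length).sum)]
  apply congrArg
  apply List.map_congr_left
  intro row _
  rw [PySem.List.slice_to_natCast]

theorem pvTest (a : List (List Int)) (hP : ∀ row ∈ a, a.length ≤ row.length)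
    (i j : Nat) (hi : i < a.length) (hj : j < a.length) :
    ((a.map (pvMask a.length)).getD i 0).testBit j = decide ((a.getD i []).getD j 0 ≠ 0) := by
  rw [pvMask_testBit a i j hi (hP _ (pvRow_mem a i hi))]
  simp [hj]

theorem pvGuard (a : List (List Int)) (hP : ∀ row ∈ a, a.length ≤ row.length)
    (i j : Nat) (hi : i < a.length) (hj : j < a.length) :
    ((a.map (pvMask a.length)).getD i 0 >>> j &&& 1 ≠ 0) ↔ pvAt a (i : Int) (j : Int) ≠ 0 := by
  rw [pvShiftTest, pvTest a hP i j hi hj, pvAt_cast]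
  simp

theorem pvTri (a : List (List Int)) (hP : ∀ row ∈ a, a.length ≤ row.length) :
    List.foldl (fun acc i =>
        List.foldl (fun acc j =>
            if pvAt a i j ≠ 0 then
              List.foldl (fun acc k => if pvAt a i k ≠ 0 ∧ pvAt a j k ≠ 0 then acc + 1 else acc)
                acc (PySem.List.pyRange 0 (a.length : Int) 1)
            else acc)
          acc (PySem.List.pyRange 0 (a.length : Int) 1))
      0 (PySem.List.pyRange 0 (a.length : Int) 1)
    = List.foldl (fun acc i =>
        List.foldl (fun acc j =>
            if (a.map (pvMask a.length)).getD i 0 >>> j &&& 1 ≠ 0 then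
              acc + ((PySem.Int.bitCount (((a.map (pvMask a.length)).getD i 0
                        &&& (a.map (pvMask a.length)).getD j 0 : Nat) : Int)) : Int)
            else acc)
          acc (List.range a.length))
      0 (List.range a.length) := by
  simp only [pvFoldl_range]
  apply PySem.List.foldl_congr_mem
  intro acc i hi
  apply PySem.List.foldl_congr_mem
  intro acc2 j hj
  rw [List.mem_range] at hi hj
  by_cases hq : pvAt a (i : Int) (j : Int) ≠ 0
  · rw [if_pos hq, if_pos ((pvGuard a hP i j hi hj).mpr hq)]
    rw [PySem.List.foldl_ite_add_one
      (fun k : Nat => pvAt a (i : Int) (k : Int) ≠ 0 ∧ pvAt a (j : Int) (k : Int) ≠ 0)]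
    rw [pvPop_and a.length _ _ (pvMask_lt a i hi)]
    refine congrArg (fun z : Int => acc2 + z) (congrArg (Nat.cast : Nat → Int) (List.countP_congr ?_))
    intro k hk
    rw [List.mem_range] at hk
    rw [pvTest a hP i k hi hk, pvTest a hP j k hj hk]
    simp [pvAt_cast]
  · rw [if_neg hq, if_neg (fun h => hq ((pvGuard a hP i j hi hj).mp h))]

theorem pvTet (a : List (List Int)) (hP : ∀ row ∈ a, a.length ≤ row.length) :
    List.foldl (fun acc i =>
        List.foldl (fun acc j =>
            if ¬pvAt a i j ≠ 0 then acc
            else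
              List.foldl (fun acc k =>
                  if ¬(pvAt a i k ≠ 0 ∧ pvAt a j k ≠ 0) then acc
                  else
                    List.foldl (fun acc l =>
                        if pvAt a i l ≠ 0 ∧ pvAt a j l ≠ 0 ∧ pvAt a k l ≠ 0 then acc + 1 else acc)
                      acc (PySem.List.pyRange 0 (a.length : Int) 1))
                acc (PySem.List.pyRange 0 (a.length : Int) 1))
          acc (PySem.List.pyRange 0 (a.length : Int) 1))
      0 (PySem.List.pyRange 0 (a.length : Int) 1)
    = List.foldl (fun acc i =>
        List.foldl (fun acc j =>
            if (a.map (pvMask a.length)).getD i 0 >>> j &&& 1 ≠ 0 then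
              List.foldl (fun acc k =>
                  if ((a.map (pvMask a.length)).getD i 0 &&& (a.map (pvMask a.length)).getD j 0) >>> k &&& 1 ≠ 0 then
                    acc + ((PySem.Int.bitCount ((((a.map (pvMask a.length)).getD i 0
                              &&& (a.map (pvMask a.length)).getD j 0)
                              &&& (a.map (pvMask a.length)).getD k 0 : Nat) : Int)) : Int)
                  else acc)
                acc (List.range a.length)
            else acc)
          acc (List.range a.length))
      0 (List.range a.length) := by
  simp only [pvFoldl_range]
  apply PySem.List.foldl_congr_mem
  intro acc i hi
  apply PySem.List.foldl_congr_mem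
  intro acc2 j hj
  rw [List.mem_range] at hi hj
  by_cases hq : pvAt a (i : Int) (j : Int) ≠ 0
  · rw [if_neg (not_not_intro hq), if_pos ((pvGuard a hP i j hi hj).mpr hq)]
    apply PySem.List.foldl_congr_mem
    intro acc3 k hk
    rw [List.mem_range] at hk
    have hm : (((a.map (pvMask a.length)).getD i 0 &&& (a.map (pvMask a.length)).getD j 0) >>> k &&& 1 ≠ 0)
        ↔ (pvAt a (i : Int) (k : Int) ≠ 0 ∧ pvAt a (j : Int) (k : Int) ≠ 0) := by
      rw [pvShiftTest, Nat.testBit_and, pvTest a hP i k hi hk, pvTest a hP j k hj hk]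
      simp [pvAt_cast]
    by_cases hq2 : pvAt a (i : Int) (k : Int) ≠ 0 ∧ pvAt a (j : Int) (k : Int) ≠ 0
    · rw [if_neg (not_not_intro hq2), if_pos (hm.mpr hq2)]
      rw [PySem.List.foldl_ite_add_one
        (fun l : Nat => pvAt a (i : Int) (l : Int) ≠ 0 ∧ pvAt a (j : Int) (l : Int) ≠ 0
          ∧ pvAt a (k : Int) (l : Int) ≠ 0)]
      rw [pvPop_and a.length _ _ (pvAnd_lt _ (pvMask_lt a i hi))]
      refine congrArg (fun z : Int => acc3 + z) (congrArg (Nat.cast : Nat → Int) (List.countP_congr ?_))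
      intro l hl
      rw [List.mem_range] at hl
      rw [Nat.testBit_and, pvTest a hP i l hi hl, pvTest a hP j l hj hl,
        pvTest a hP k l hk hl]
      simp [pvAt_cast, and_assoc]
    · rw [if_pos hq2, if_neg (fun h => hq2 (hm.mp h))]
  · rw [if_pos hq, if_neg (fun h => hq ((pvGuard a hP i j hi hj).mp h))]

theorem pvMain (a : List (List Int)) (mk : Int)
    (hPre : mk < 1 ∨ ∀ row ∈ a, a.length ≤ row.length) :
    directed_clique_count a mk = directed_clique_count_alt a mk := by
  unfold directed_clique_count directed_clique_count_alt
  simp only [PySem.List.len_eq]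
  by_cases h1 : mk < 1
  · simp [h1]
  have hP : ∀ row ∈ a, a.length ≤ row.length := hPre.resolve_left h1
  by_cases h2 : mk < 2
  · simp only [h1, h2, if_false, if_true]
    rw [pvEdges a hP]
  by_cases h3 : mk < 3
  · simp only [h1, h2, h3, if_false, if_true]
    rw [pvEdges a hP, pvTri a hP]
  · simp only [h1, h2, h3, if_false]
    rw [pvEdges a hP, pvTri a hP, pvTet a hP]

-- ===== VERDICT (by name: the statement is the Claim_ definition above) =====
theorem directed_clique_count_spec : Claim_equal_directed_clique_count := by
  intro adjacency_matrix max_k _ hP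
  unfold Spec_directed_clique_count
  exact pvMain adjacency_matrix max_k hP
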